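-- pv_equiv track=rewrite | github.com/pakeknig/suoha | judge.py | if_two_zero
-- ===== SOURCE A (Python) =====
-- def if_four_one(x):
--     """
--     判断是否为四条
--
--     参数：
--         x：五张牌的列表
--
--     返回值：
--         如果有四张点数相同的牌，返回True，否则返回False
--     """
--     card_numbers = [x[i][1] for i in range(0, 5)]
--     if card_numbers.count(x[0][1]) == 4 or card_numbers.count(x[1][1]) == 4:
--         return True
--     else:
--         return False
--
-- def if_two_two(x):
--     """
--     判断是否为两对（不包含葫芦）
--
--     参数：
--         x：五张牌的列表
--
--     返回值：
--         如果有两对点数相同的牌（不包含葫芦），返回True，否则返回False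
--     """
--     if not if_four_one(x):
--         card_values = sorted([x[i][1] for i in range(0, 5)])
--         if (card_values[0] == card_values[1] and card_values[2] == card_values[3]) or \
--                 (card_values[0] == card_values[1] and card_values[3] == card_values[4]) or \
--                 (card_values[1] == card_values[2] and card_values[3] == card_values[4]):
--             return True
--         else:
--             return False
--     else:
--         return False
--
-- def if_two_zero(x):
--     """
--     判断是否为一对（可能包含葫芦）
--
--     参数：
--         x：五张牌的列表
--
--     返回值：
--         如果有一对点数相同的牌（可能包含葫芦），返回True，否则返回False
--     """
--     if if_two_two(x):
--         return False
--     else: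
--         card_values = sorted([x[i][1] for i in range(0, 5)])
--         if card_values.count(card_values[0]) == 2 or card_values.count(card_values[1]) == 2 or \
--                 card_values.count(card_values[2]) == 2 or card_values.count(card_values[3]) == 2:
--             return True
--         else:
--             return False
-- ===== SOURCE B (Python) =====
-- def if_two_zero(x):
--     ranks = [x[i][1] for i in range(5)]
--     pairs = sum(1 for i in range(5) for j in range(i + 1, 5) if ranks[i] == ranks[j])
--     return pairs == 1
-- ===== Notes on version B (the rewrite author's own statement) =====
-- stated objective: simpler
-- what changed: Replaces the three-helper chain (quad check, sorted-adjacency two-pair patterns, sorted count scan) by a single pass that counts equal-rank index pairs among the first five cards and returns whether that count is exactly 1.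
import Mathlib
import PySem

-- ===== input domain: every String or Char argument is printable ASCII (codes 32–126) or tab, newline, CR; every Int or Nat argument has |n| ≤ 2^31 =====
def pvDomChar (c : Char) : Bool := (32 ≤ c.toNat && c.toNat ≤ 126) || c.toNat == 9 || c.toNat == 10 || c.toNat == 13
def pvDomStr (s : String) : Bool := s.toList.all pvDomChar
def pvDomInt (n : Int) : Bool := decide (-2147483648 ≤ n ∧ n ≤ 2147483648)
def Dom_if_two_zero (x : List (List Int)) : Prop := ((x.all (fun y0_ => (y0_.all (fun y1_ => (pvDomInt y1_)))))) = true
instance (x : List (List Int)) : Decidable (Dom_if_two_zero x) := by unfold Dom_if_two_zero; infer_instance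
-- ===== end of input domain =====

-- B (simpler): replaces A's helper chain (quad check + sorted two-pair patterns + sorted count scan)
-- by counting equal-rank index pairs among the first five cards and testing whether that count is 1.
-- ===== PORT A =====
-- card_numbers = [x[i][1] for i in range(0, 5)] (the list comprehension shared by all three helpers)
def pvRanks (x : List (List Int)) : List Int :=
  (PySem.List.pyRange 0 5 1).map (fun i => PySem.List.pyGetD (PySem.List.pyGetD x i []) 1 0)

def if_four_one (x : List (List Int)) : Bool :=
  let card_numbers := pvRanks x
  if card_numbers.count (PySem.List.pyGetD (PySem.List.pyGetD x 0 []) 1 0) == 4 ||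
     card_numbers.count (PySem.List.pyGetD (PySem.List.pyGetD x 1 []) 1 0) == 4 then
    true
  else
    false

def if_two_two (x : List (List Int)) : Bool :=
  if !(if_four_one x) then
    let card_values := PySem.List.sorted (pvRanks x) (fun v => v) false
    if (PySem.List.pyGetD card_values 0 0 == PySem.List.pyGetD card_values 1 0 &&
        PySem.List.pyGetD card_values 2 0 == PySem.List.pyGetD card_values 3 0) ||
       (PySem.List.pyGetD card_values 0 0 == PySem.List.pyGetD card_values 1 0 &&
        PySem.List.pyGetD card_values 3 0 == PySem.List.pyGetD card_values 4 0) ||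
       (PySem.List.pyGetD card_values 1 0 == PySem.List.pyGetD card_values 2 0 &&
        PySem.List.pyGetD card_values 3 0 == PySem.List.pyGetD card_values 4 0) then
      true
    else
      false
  else
    false

def if_two_zero (x : List (List Int)) : Bool :=
  if if_two_two x then
    false
  else
    let card_values := PySem.List.sorted (pvRanks x) (fun v => v) false
    if card_values.count (PySem.List.pyGetD card_values 0 0) == 2 ||
       card_values.count (PySem.List.pyGetD card_values 1 0) == 2 ||
       card_values.count (PySem.List.pyGetD card_values 2 0) == 2 ||
       card_values.count (PySem.List.pyGetD card_values 3 0) == 2 then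
      true
    else
      false

-- ===== PORT B =====
-- pairs = sum(1 for i in range(5) for j in range(i+1, 5) if ranks[i] == ranks[j]); return pairs == 1
def if_two_zero_alt (x : List (List Int)) : Bool :=
  let ranks := (PySem.List.pyRange 0 5 1).map (fun i => PySem.List.pyGetD (PySem.List.pyGetD x i []) 1 0)
  let pairs : Int :=
    (PySem.List.pyRange 0 5 1).foldl (fun acc i =>
      (PySem.List.pyRange (i + 1) 5 1).foldl (fun acc2 j =>
        if PySem.List.pyGetD ranks i 0 == PySem.List.pyGetD ranks j 0 then acc2 + 1 else acc2) acc) 0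
  pairs == 1

-- ===== PRECONDITION & SPEC =====
-- A evaluates x[i][1] for i in range(5): any x with fewer than five cards, or a card among the
-- first five with fewer than two entries, raises IndexError.
def Pre_if_two_zero (x : List (List Int)) : Prop :=
  5 ≤ x.length ∧ ∀ y ∈ x.take 5, 2 ≤ y.length
instance (x : List (List Int)) : Decidable (Pre_if_two_zero x) := by unfold Pre_if_two_zero; infer_instance

def pvWitness_if_two_zero : List (List Int) := [[0, 1], [0, 2], [1, 2], [2, 3], [3, 4]]

def Spec_if_two_zero (x : List (List Int)) (out : Bool) : Prop := out = if_two_zero_alt x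
instance (x : List (List Int)) (out : Bool) : Decidable (Spec_if_two_zero x out) := by unfold Spec_if_two_zero; infer_instance

-- ===== CLAIM (what is proved, stated in full; the proofs are below) =====
def Claim_equal_if_two_zero : Prop := ∀ (x : List (List Int)), Dom_if_two_zero x → Pre_if_two_zero x → Spec_if_two_zero x (if_two_zero x)

-- ===== LEMMAS AND PROOFS =====

-- number of unordered index pairs holding equal values (what B counts)
def pcnt : List Int → Int
  | [] => 0
  | r :: rs => rs.count r + pcnt rs

theorem pcnt_perm {l1 l2 : List Int} (h : l1.Perm l2) : pcnt l1 = pcnt l2 := by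
  induction h with
  | nil => rfl
  | cons x h ih => simp [pcnt, ih, h.count_eq]
  | swap x y l =>
      simp only [pcnt, List.count_cons, beq_iff_eq]
      rcases eq_or_ne x y with rfl | hne
      · ring
      · rw [if_neg hne, if_neg hne.symm]; push_cast; ring
  | trans _ _ ih1 ih2 => rw [ih1, ih2]

theorem two_counts {v r : Int} {S : List Int} (hne : r ≠ v) : S.count r + S.count v ≤ S.length := by
  induction S with
  | nil => simp
  | cons x xs ih =>
      simp only [List.count_cons, List.length_cons, beq_iff_eq]
      rcases eq_or_ne x r with rfl | hA <;> rcases eq_or_ne x v with rfl | hB <;> simp_all <;> omega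

theorem ite_succ_eq (c : Prop) [Decidable c] (x : Int) : (if c then x + 1 else x) = x + (if c then 1 else 0) := by
  split <;> simp

set_option maxHeartbeats 1000000 in
theorem ranks_eval (a0 r0 a1 r1 a2 r2 a3 r3 a4 r4 : Int) (t0 t1 t2 t3 t4 : List Int)
    (rest : List (List Int)) :
    ((PySem.List.pyRange 0 5 1).map (fun i => PySem.List.pyGetD (PySem.List.pyGetD
      ((a0::r0::t0) :: (a1::r1::t1) :: (a2::r2::t2) :: (a3::r3::t3) :: (a4::r4::t4) :: rest) i []) 1 0))
    = [r0, r1, r2, r3, r4] := by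
  simp [pysem, show PySem.List.pyRange 0 5 1 = [0, 1, 2, 3, 4] from by decide]

theorem get01 (a0 r0 : Int) (t0 : List Int) (rest : List (List Int)) :
    PySem.List.pyGetD (PySem.List.pyGetD ((a0::r0::t0) :: rest) 0 []) 1 0 = r0 := by
  simp [pysem]

theorem get11 (c0 : List Int) (a1 r1 : Int) (t1 : List Int) (rest : List (List Int)) :
    PySem.List.pyGetD (PySem.List.pyGetD (c0 :: (a1::r1::t1) :: rest) 1 []) 1 0 = r1 := by
  simp [pysem]

set_option maxHeartbeats 1000000 in
theorem b_pairs (r0 r1 r2 r3 r4 : Int) :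
    ((PySem.List.pyRange 0 5 1).foldl (fun acc i =>
      (PySem.List.pyRange (i + 1) 5 1).foldl (fun acc2 j =>
        if PySem.List.pyGetD [r0,r1,r2,r3,r4] i 0 == PySem.List.pyGetD [r0,r1,r2,r3,r4] j 0 then acc2 + 1 else acc2) acc) (0 : Int))
    = pcnt [r0,r1,r2,r3,r4] := by
  simp only [show PySem.List.pyRange 0 5 1 = [0,1,2,3,4] from by decide,
    show PySem.List.pyRange (0+1) 5 1 = [1,2,3,4] from by decide,
    show PySem.List.pyRange (1+1) 5 1 = [2,3,4] from by decide,
    show PySem.List.pyRange (2+1) 5 1 = [3,4] from by decide,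
    show PySem.List.pyRange (3+1) 5 1 = [4] from by decide,
    show PySem.List.pyRange (4+1) 5 1 = [] from by decide,
    List.foldl_cons, List.foldl_nil]
  simp only [show ∀ z0 z1 z2 z3 z4 : Int, PySem.List.pyGetD [z0,z1,z2,z3,z4] 0 0 = z0 from fun _ _ _ _ _ => rfl,
    show ∀ z0 z1 z2 z3 z4 : Int, PySem.List.pyGetD [z0,z1,z2,z3,z4] 1 0 = z1 from fun _ _ _ _ _ => rfl,
    show ∀ z0 z1 z2 z3 z4 : Int, PySem.List.pyGetD [z0,z1,z2,z3,z4] 2 0 = z2 from fun _ _ _ _ _ => rfl,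
    show ∀ z0 z1 z2 z3 z4 : Int, PySem.List.pyGetD [z0,z1,z2,z3,z4] 3 0 = z3 from fun _ _ _ _ _ => rfl,
    show ∀ z0 z1 z2 z3 z4 : Int, PySem.List.pyGetD [z0,z1,z2,z3,z4] 4 0 = z4 from fun _ _ _ _ _ => rfl,
    pcnt, List.count_cons, List.count_nil, beq_iff_eq, ite_succ_eq,
    Nat.cast_add, Nat.cast_ite, Nat.cast_one, Nat.cast_zero]
  simp only [eq_comm]
  push_cast
  ring

set_option maxHeartbeats 1000000 in
theorem sorted5_core (a b c d e : Int) (h1 : a ≤ b) (h2 : b ≤ c) (h3 : c ≤ d) (h4 : d ≤ e) :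
    ((¬((a = b ∧ c = d) ∨ (a = b ∧ d = e) ∨ (b = c ∧ d = e))) ∧
     (([a,b,c,d,e] : List Int).count a = 2 ∨ ([a,b,c,d,e] : List Int).count b = 2 ∨
      ([a,b,c,d,e] : List Int).count c = 2 ∨ ([a,b,c,d,e] : List Int).count d = 2)) ↔
    pcnt [a,b,c,d,e] = 1 := by
  rcases eq_or_lt_of_le h1 with rfl | h1 <;> rcases eq_or_lt_of_le h2 with rfl | h2 <;>
    rcases eq_or_lt_of_le h3 with rfl | h3 <;> rcases eq_or_lt_of_le h4 with rfl | h4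
  · simp [pcnt, List.count_cons]
    try omega
  · simp [pcnt, List.count_cons, show a ≠ e from by omega, show e ≠ a from by omega]
    try omega
  · simp [pcnt, List.count_cons, show a ≠ d from by omega, show d ≠ a from by omega]
    try omega
  · simp [pcnt, List.count_cons, show a ≠ d from by omega, show a ≠ e from by omega, show d ≠ a from by omega, show d ≠ e from by omega, show e ≠ a from by omega, show e ≠ d from by omega]
    try omega
  · simp [pcnt, List.count_cons, show a ≠ c from by omega, show c ≠ a from by omega]
    try omega
  · simp [pcnt, List.count_cons, show a ≠ c from by omega, show a ≠ e from by omega, show c ≠ a from by omega, show c ≠ e from by omega, show e ≠ a from by omega, show e ≠ c from by omega]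
    try omega
  · simp [pcnt, List.count_cons, show a ≠ c from by omega, show a ≠ d from by omega, show c ≠ a from by omega, show c ≠ d from by omega, show d ≠ a from by omega, show d ≠ c from by omega]
    try omega
  · simp [pcnt, List.count_cons, show a ≠ c from by omega, show a ≠ d from by omega, show a ≠ e from by omega, show c ≠ a from by omega, show c ≠ d from by omega, show c ≠ e from by omega, show d ≠ a from by omega, show d ≠ c from by omega, show d ≠ e from by omega, show e ≠ a from by omega, show e ≠ c from by omega, show e ≠ d from by omega]
    try omega
  · simp [pcnt, List.count_cons, show a ≠ b from by omega, show b ≠ a from by omega]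
    try omega
  · simp [pcnt, List.count_cons, show a ≠ b from by omega, show a ≠ e from by omega, show b ≠ a from by omega, show b ≠ e from by omega, show e ≠ a from by omega, show e ≠ b from by omega]
    try omega
  · simp [pcnt, List.count_cons, show a ≠ b from by omega, show a ≠ d from by omega, show b ≠ a from by omega, show b ≠ d from by omega, show d ≠ a from by omega, show d ≠ b from by omega]
    try omega
  · simp [pcnt, List.count_cons, show a ≠ b from by omega, show a ≠ d from by omega, show a ≠ e from by omega, show b ≠ a from by omega, show b ≠ d from by omega, show b ≠ e from by omega, show d ≠ a from by omega, show d ≠ b from by omega, show d ≠ e from by omega, show e ≠ a from by omega, show e ≠ b from by omega, show e ≠ d from by omega]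
    try omega
  · simp [pcnt, List.count_cons, show a ≠ b from by omega, show a ≠ c from by omega, show b ≠ a from by omega, show b ≠ c from by omega, show c ≠ a from by omega, show c ≠ b from by omega]
    try omega
  · simp [pcnt, List.count_cons, show a ≠ b from by omega, show a ≠ c from by omega, show a ≠ e from by omega, show b ≠ a from by omega, show b ≠ c from by omega, show b ≠ e from by omega, show c ≠ a from by omega, show c ≠ b from by omega, show c ≠ e from by omega, show e ≠ a from by omega, show e ≠ b from by omega, show e ≠ c from by omega]
    try omega
  · simp [pcnt, List.count_cons, show a ≠ b from by omega, show a ≠ c from by omega, show a ≠ d from by omega, show b ≠ a from by omega, show b ≠ c from by omega, show b ≠ d from by omega, show c ≠ a from by omega, show c ≠ b from by omega, show c ≠ d from by omega, show d ≠ a from by omega, show d ≠ b from by omega, show d ≠ c from by omega]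
    try omega
  · simp [pcnt, List.count_cons, show a ≠ b from by omega, show a ≠ c from by omega, show a ≠ d from by omega, show a ≠ e from by omega, show b ≠ a from by omega, show b ≠ c from by omega, show b ≠ d from by omega, show b ≠ e from by omega, show c ≠ a from by omega, show c ≠ b from by omega, show c ≠ d from by omega, show c ≠ e from by omega, show d ≠ a from by omega, show d ≠ b from by omega, show d ≠ c from by omega, show d ≠ e from by omega, show e ≠ a from by omega, show e ≠ b from by omega, show e ≠ c from by omega, show e ≠ d from by omega]
    try omega

theorem bridge (a b c d e r0 r1 : Int) (h1 : a ≤ b) (h2 : b ≤ c) (h3 : c ≤ d) (h4 : d ≤ e)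
    (hr0 : r0 ∈ ([a,b,c,d,e] : List Int)) (hr1 : r1 ∈ ([a,b,c,d,e] : List Int)) :
    (((([a,b,c,d,e] : List Int).count r0 = 4 ∨ ([a,b,c,d,e] : List Int).count r1 = 4) ∨
      ¬((a = b ∧ c = d) ∨ (a = b ∧ d = e) ∨ (b = c ∧ d = e))) ∧
     (([a,b,c,d,e] : List Int).count a = 2 ∨ ([a,b,c,d,e] : List Int).count b = 2 ∨
      ([a,b,c,d,e] : List Int).count c = 2 ∨ ([a,b,c,d,e] : List Int).count d = 2)) ↔
    pcnt [a,b,c,d,e] = 1 := by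
  constructor
  · rintro ⟨h4orP, hC2⟩
    rcases h4orP with h4c | hnp
    · exfalso
      obtain ⟨v, hv, hvc⟩ : ∃ v, v ∈ ([a,b,c,d,e] : List Int) ∧ ([a,b,c,d,e] : List Int).count v = 2 := by
        rcases hC2 with h | h | h | h
        · exact ⟨a, by simp, h⟩
        · exact ⟨b, by simp, h⟩
        · exact ⟨c, by simp, h⟩
        · exact ⟨d, by simp, h⟩
      rcases h4c with h4c | h4c
      · have hne : r0 ≠ v := by rintro rfl; omega
        have := two_counts (S := [a,b,c,d,e]) hne
        simp only [List.length_cons, List.length_nil] at this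
        omega
      · have hne : r1 ≠ v := by rintro rfl; omega
        have := two_counts (S := [a,b,c,d,e]) hne
        simp only [List.length_cons, List.length_nil] at this
        omega
    · exact (sorted5_core a b c d e h1 h2 h3 h4).mp ⟨hnp, hC2⟩
  · intro h
    obtain ⟨hnp, hC2⟩ := (sorted5_core a b c d e h1 h2 h3 h4).mpr h
    exact ⟨Or.inr hnp, hC2⟩

-- ===== VERDICT (by name: the statement is the Claim_ definition above) =====
set_option maxHeartbeats 1000000 in
theorem if_two_zero_spec : Claim_equal_if_two_zero := by
  intro x hdom hpre
  unfold Spec_if_two_zero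
  obtain ⟨hlen, hcards⟩ := hpre
  rcases x with _ | ⟨c0, _ | ⟨c1, _ | ⟨c2, _ | ⟨c3, _ | ⟨c4, rest⟩⟩⟩⟩⟩ <;> simp at hlen
  have h0 : 2 ≤ c0.length := hcards c0 (by simp)
  have h1 : 2 ≤ c1.length := hcards c1 (by simp)
  have h2 : 2 ≤ c2.length := hcards c2 (by simp)
  have h3 : 2 ≤ c3.length := hcards c3 (by simp)
  have h4 : 2 ≤ c4.length := hcards c4 (by simp)
  rcases c0 with _ | ⟨a0, _ | ⟨r0, t0⟩⟩ <;> simp at h0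
  rcases c1 with _ | ⟨a1, _ | ⟨r1, t1⟩⟩ <;> simp at h1
  rcases c2 with _ | ⟨a2, _ | ⟨r2, t2⟩⟩ <;> simp at h2
  rcases c3 with _ | ⟨a3, _ | ⟨r3, t3⟩⟩ <;> simp at h3
  rcases c4 with _ | ⟨a4, _ | ⟨r4, t4⟩⟩ <;> simp at h4
  unfold if_two_zero if_two_two if_four_one if_two_zero_alt pvRanks
  rw [ranks_eval, get01, get11]
  dsimp only
  rw [b_pairs]
  have hperm : (PySem.List.sorted [r0,r1,r2,r3,r4] (fun v => v) false).Perm [r0,r1,r2,r3,r4] :=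
    PySem.List.sorted_perm _ _ _
  have hlen5 : (PySem.List.sorted [r0,r1,r2,r3,r4] (fun v => v) false).length = 5 := by
    simp [hperm.length_eq]
  have hpw := PySem.List.sorted_pairwise [r0,r1,r2,r3,r4] (fun v => v)
  rcases hS : PySem.List.sorted [r0,r1,r2,r3,r4] (fun v => v) false with _|⟨a,_|⟨b,_|⟨c,_|⟨d,_|⟨e,tl⟩⟩⟩⟩⟩ <;>
    rw [hS] at hlen5 <;> simp at hlen5
  obtain rfl : tl = [] := by simpa using hlen5
  rw [hS] at hperm hpw
  have hp1 := List.pairwise_cons.mp hpw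
  have hp2 := List.pairwise_cons.mp hp1.2
  have hp3 := List.pairwise_cons.mp hp2.2
  have hp4 := List.pairwise_cons.mp hp3.2
  have w1 : a ≤ b := hp1.1 b (by simp)
  have w2 : b ≤ c := hp2.1 c (by simp)
  have w3 : c ≤ d := hp3.1 d (by simp)
  have w4 : d ≤ e := hp4.1 e (by simp)
  rw [pcnt_perm hperm.symm]
  simp only [show List.count r0 [r0,r1,r2,r3,r4] = List.count r0 [a,b,c,d,e] from (hperm.count_eq r0).symm,
    show List.count r1 [r0,r1,r2,r3,r4] = List.count r1 [a,b,c,d,e] from (hperm.count_eq r1).symm]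
  have hr0 : r0 ∈ ([a,b,c,d,e] : List Int) := hperm.mem_iff.mpr (by simp)
  have hr1 : r1 ∈ ([a,b,c,d,e] : List Int) := hperm.mem_iff.mpr (by simp)
  simp only [show ∀ z0 z1 z2 z3 z4 : Int, PySem.List.pyGetD [z0,z1,z2,z3,z4] 0 0 = z0 from fun _ _ _ _ _ => rfl,
    show ∀ z0 z1 z2 z3 z4 : Int, PySem.List.pyGetD [z0,z1,z2,z3,z4] 1 0 = z1 from fun _ _ _ _ _ => rfl,
    show ∀ z0 z1 z2 z3 z4 : Int, PySem.List.pyGetD [z0,z1,z2,z3,z4] 2 0 = z2 from fun _ _ _ _ _ => rfl,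
    show ∀ z0 z1 z2 z3 z4 : Int, PySem.List.pyGetD [z0,z1,z2,z3,z4] 3 0 = z3 from fun _ _ _ _ _ => rfl,
    show ∀ z0 z1 z2 z3 z4 : Int, PySem.List.pyGetD [z0,z1,z2,z3,z4] 4 0 = z4 from fun _ _ _ _ _ => rfl]
  rw [Bool.eq_iff_iff]
  simp only [Bool.or_eq_true, Bool.and_eq_true, Bool.not_eq_true', beq_iff_eq,
    Bool.ite_eq_true_distrib, if_true_left, Bool.not_eq_true]
  rw [← bridge a b c d e r0 r1 w1 w2 w3 w4 hr0 hr1]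
  clear hdom hcards hS hlen5 hperm hpw hp1 hp2 hp3 hp4
  by_cases hF : List.count r0 [a,b,c,d,e] = 4 ∨ List.count r1 [a,b,c,d,e] = 4 <;>
    by_cases hP : ((a = b ∧ c = d ∨ a = b ∧ d = e) ∨ b = c ∧ d = e) <;>
    simp [hF, hP] <;> tauto
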